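-- pv_equiv track=rewrite | github.com/posl/comment_recommendation | script/mod_gen/3_time/zh/103_C/3.py | get_max_f
-- ===== SOURCE A (Python) =====
-- def get_max_f(num_list):
--     max_num = max(num_list)
--     num_list.remove(max_num)
--     max_f = 0
--     for i in range(max_num):
--         f = 0
--         for num in num_list:
--             f += i%num
--         if f > max_f:
--             max_f = f
--     return max_f
-- ===== SOURCE B (Python) =====
-- def get_max_f(num_list):
--     max_num = max(num_list)
--     num_list.remove(max_num)
--     totals = [0] * max_num
--     for num in num_list:
--         totals = [t + i % num for i, t in zip(range(max_num), totals)]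
--     return max(totals) if totals else 0
-- ===== Notes on version B (the rewrite author's own statement) =====
-- stated objective: alternative
-- what changed: B inverts the loop nesting: it builds the full table of per-i remainder sums (updating the whole table once per remaining num) and then takes the max of the table in a single separate pass, instead of A's running scalar max with an inner sum loop per i; like A, B removes the max from num_list in place.
import Mathlib
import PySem

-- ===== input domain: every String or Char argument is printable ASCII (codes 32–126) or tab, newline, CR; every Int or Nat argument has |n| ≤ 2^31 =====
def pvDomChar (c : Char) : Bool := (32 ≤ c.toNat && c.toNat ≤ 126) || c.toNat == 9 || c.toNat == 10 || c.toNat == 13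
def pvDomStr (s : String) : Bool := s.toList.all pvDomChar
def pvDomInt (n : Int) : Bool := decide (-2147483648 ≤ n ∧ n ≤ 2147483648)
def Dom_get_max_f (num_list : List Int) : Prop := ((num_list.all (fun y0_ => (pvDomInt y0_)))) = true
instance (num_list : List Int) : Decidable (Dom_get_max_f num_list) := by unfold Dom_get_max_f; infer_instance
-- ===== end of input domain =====

-- B builds the full table of per-i remainder sums (one rebuilt table per remaining num),
-- then takes the max in a separate pass (objective: alternative decomposition, same cost);
-- both A and B mutate num_list in place (remove the max) — the claim is about the return value.

-- ===== PORT A =====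
def get_max_f (num_list : List Int) : Int :=
  match PySem.List.max? num_list (fun x => x) with
  | none => 0
  | some max_num =>
    let rest := (PySem.List.remove? num_list max_num).getD num_list
    (PySem.List.pyRange 0 max_num 1).foldl (fun max_f i =>
      let f := rest.foldl (fun f num => f + PySem.Int.mod i num) 0
      if f > max_f then f else max_f) 0

-- ===== PORT B =====
def get_max_f_alt (num_list : List Int) : Int :=
  match PySem.List.max? num_list (fun x => x) with
  | none => 0
  | some max_num =>
    let rest := (PySem.List.remove? num_list max_num).getD num_list
    let totals := rest.foldl (fun totals num =>
        List.zipWith (fun i t => t + PySem.Int.mod i num) (PySem.List.pyRange 0 max_num 1) totals)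
      (List.replicate max_num.toNat 0)
    match PySem.List.max? totals (fun x => x) with
    | none => 0
    | some m => m

-- ===== PRECONDITION & SPEC =====
-- Pre_ excludes exactly the inputs where Python A raises: the empty list (ValueError from max)
-- and lists containing 0 whose maximum is positive (ZeroDivisionError from i % 0).
def Pre_get_max_f (num_list : List Int) : Prop :=
  num_list ≠ [] ∧ ((0 : Int) ∈ num_list → ∀ x ∈ num_list, x ≤ 0)
instance (num_list : List Int) : Decidable (Pre_get_max_f num_list) := by unfold Pre_get_max_f; infer_instance
def pvWitness_get_max_f : List Int := [3, 5, 2]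

def Spec_get_max_f (num_list : List Int) (out : Int) : Prop := out = get_max_f_alt num_list
instance (num_list : List Int) (out : Int) : Decidable (Spec_get_max_f num_list out) := by unfold Spec_get_max_f; infer_instance

-- ===== CLAIM (what is proved, stated in full; the proofs are below) =====
def Claim_equal_get_max_f : Prop := ∀ (num_list : List Int), Dom_get_max_f num_list → Pre_get_max_f num_list → Spec_get_max_f num_list (get_max_f num_list)

-- ===== LEMMAS AND PROOFS =====

-- one update pass of B, with rng = the fixed index list
def pvStep (rng : List Int) (ts : List Int) (num : Int) : List Int :=
  List.zipWith (fun i t => t + PySem.Int.mod i num) rng ts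

lemma pvStep_length (rng ts : List Int) (num : Int) (h : ts.length = rng.length) :
    (pvStep rng ts num).length = rng.length := by
  simp [pvStep, h]

lemma pvStep_getElem (rng ts : List Int) (num : Int) (h : ts.length = rng.length)
    (k : Nat) (hk : k < rng.length) :
    (pvStep rng ts num)[k]'(by simpa [pvStep_length rng ts num h] using hk)
      = ts[k]'(by omega) + PySem.Int.mod (rng[k]'hk) num := by
  simp [pvStep]

lemma fold_length (rng rest ts : List Int) (h : ts.length = rng.length) :
    (rest.foldl (pvStep rng) ts).length = rng.length := by
  induction rest generalizing ts with
  | nil => simpa using h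
  | cons num rest ih =>
    simpa [List.foldl_cons] using ih (pvStep rng ts num) (pvStep_length rng ts num h)

lemma fold_getElem (rng rest ts : List Int) (h : ts.length = rng.length)
    (k : Nat) (hk : k < rng.length) :
    (rest.foldl (pvStep rng) ts)[k]'(by simpa [fold_length rng rest ts h] using hk)
      = rest.foldl (fun f num => f + PySem.Int.mod (rng[k]'hk) num) (ts[k]'(by omega)) := by
  induction rest generalizing ts with
  | nil => rfl
  | cons num rest ih =>
    have h' : (pvStep rng ts num).length = rng.length := pvStep_length rng ts num h
    simpa [List.foldl_cons, pvStep_getElem rng ts num h k hk] using ih (pvStep rng ts num) h'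

-- the table B builds is exactly the list of A's inner sums
lemma totals_eq (rest : List Int) (m : Int) :
    rest.foldl (pvStep ((List.range m.toNat).map (fun (k : Nat) => (k : Int)))) (List.replicate m.toNat 0)
      = (List.range m.toNat).map
          (fun (k : Nat) => rest.foldl (fun f num => f + PySem.Int.mod (k : Int) num) 0) := by
  have hlen : (List.replicate m.toNat (0 : Int)).length
      = ((List.range m.toNat).map (fun (k : Nat) => (k : Int))).length := by
    simp
  apply List.ext_getElem
  · simp [fold_length _ rest _ hlen]
  · intro k h1 h2
    have hk : k < ((List.range m.toNat).map (fun (k : Nat) => (k : Int))).length := by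
      simpa [fold_length _ rest _ hlen] using h1
    rw [fold_getElem _ rest _ hlen k hk, List.getElem_replicate, List.getElem_map,
      List.getElem_range, List.getElem_map, List.getElem_range]

lemma if_gt_eq_max (m f : Int) : (if f > m then f else m) = max m f := by
  split <;> omega

lemma sum_zero (rest : List Int) :
    rest.foldl (fun f num => f + PySem.Int.mod (0 : Int) num) 0 = 0 := by
  induction rest with
  | nil => rfl
  | cons num rest ih => simp [List.foldl_cons, PySem.Int.mod]

-- running-max over the sums = max of the table
lemma core (rest : List Int) (n : Nat) :
    (List.range n).foldl
        (fun (m : Int) (k : Nat) => max m (rest.foldl (fun f num => f + PySem.Int.mod (k : Int) num) 0)) 0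
      = (match PySem.List.max?
            ((List.range n).map
              (fun (k : Nat) => rest.foldl (fun f num => f + PySem.Int.mod (k : Int) num) 0))
            (fun x => x) with
         | none => 0 | some m => m) := by
  cases n with
  | zero => simp [PySem.List.max?]
  | succ s =>
    rw [List.range_succ_eq_map]
    have hF0 : rest.foldl (fun f num => f + PySem.Int.mod (((0 : Nat)) : Int) num) 0 = 0 := by
      simpa using sum_zero rest
    simp only [List.map_cons, PySem.List.max?_id_cons, List.foldl_cons, List.foldl_map,
      List.map_map, Function.comp, Nat.cast_zero, sum_zero rest, max_self]

-- ===== VERDICT (by name: the statement is the Claim_ definition above) =====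
theorem get_max_f_spec : Claim_equal_get_max_f := by
  intro num_list _ _
  unfold Spec_get_max_f get_max_f get_max_f_alt
  cases hmax : PySem.List.max? num_list (fun x => x) with
  | none => rfl
  | some max_num =>
    have hrange : PySem.List.pyRange 0 max_num 1
        = (List.range max_num.toNat).map (fun k => ((k : Nat) : Int)) := by
      rw [PySem.List.pyRange_one]
      simp only [sub_zero, zero_add]
    simp only [hrange, List.foldl_map]
    generalize (PySem.List.remove? num_list max_num).getD num_list = rest
    have hfun : (fun (m : Int) (k : Nat) =>
          if (rest.foldl (fun f num => f + PySem.Int.mod (k : Int) num) 0) > m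
          then rest.foldl (fun f num => f + PySem.Int.mod (k : Int) num) 0 else m)
        = fun (m : Int) (k : Nat) =>
            max m (rest.foldl (fun f num => f + PySem.Int.mod (k : Int) num) 0) :=
      funext fun m => funext fun k => if_gt_eq_max m _
    rw [hfun, core rest max_num.toNat, ← totals_eq rest max_num]
    rfl
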